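-- pv_equiv track=rewrite | github.com/avipars/flp_python | excercise4/question2_txt.py | treatline
-- ===== SOURCE A (Python) =====
-- vow = set('aeiou')
--
-- consonants_b = set('bcdfghjklm')
--
-- consonants_n = set('npqrstvwxyz')
--
-- def categorize_characters(word):
--     """Categorize characters in the word into vowels and consonants in specified ranges.
--     return tuple and inside are lists of vowel chars in word, consonants b to m and consonants n to z
--     """
--     return (categorize(word,vow), categorize(word,consonants_b), categorize(word, consonants_n))
--
-- def categorize(word, letter_set):
--     """Given a word and set, find the occurrences of x and put in a list of chars"""
--     return [char for char in word if char in letter_set]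
--
-- def treatline(lineNr: int, line: str):
--     """Process the line and return a dictionary with categorized characters."""
--     if lineNr <= 0:
--         return -1
--     line = line.lower()
--
--     words = line.strip().split() # clean the array
--     if not all(word.isalpha() for word in words):  # if non ascii chars
--         return -1
--
--     word_dict = {word: categorize_characters(
--         word) for word in words}  # create the dictionary
--
--     return (lineNr, word_dict)  # return the line number and the dictionary
-- ===== SOURCE B (Python) =====
-- def _buckets(word):
--     vs, bs, ns = [], [], []
--     for c in word:
--         if c in "aeiou":
--             vs.append(c)
--         elif "b" <= c <= "m":
--             bs.append(c)
--         elif "n" <= c <= "z":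
--             ns.append(c)
--     return (vs, bs, ns)
--
-- def treatline(lineNr: int, line: str):
--     if lineNr <= 0:
--         return -1
--     line = line.lower()
--     words = line.strip().split()
--     if not all(w.isalpha() for w in words):
--         return -1
--     word_dict = {w: _buckets(w) for w in dict.fromkeys(words)}
--     return (lineNr, word_dict)
-- ===== Notes on version B (the rewrite author's own statement) =====
-- stated objective: alternative
-- what changed: B replaces A's three independent filter passes per word (one pass per letter set) by a single dispatch pass over the word with three accumulator lists using character-range comparisons, and builds the word dictionary over the deduplicated word list instead of re-inserting duplicates.
-- outside the precondition, e.g. on treatline(0, 'hi'): A returns -1, B returns -1; on treatline(1, 'a1 b'): A returns -1, B returns -1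
import Mathlib
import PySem

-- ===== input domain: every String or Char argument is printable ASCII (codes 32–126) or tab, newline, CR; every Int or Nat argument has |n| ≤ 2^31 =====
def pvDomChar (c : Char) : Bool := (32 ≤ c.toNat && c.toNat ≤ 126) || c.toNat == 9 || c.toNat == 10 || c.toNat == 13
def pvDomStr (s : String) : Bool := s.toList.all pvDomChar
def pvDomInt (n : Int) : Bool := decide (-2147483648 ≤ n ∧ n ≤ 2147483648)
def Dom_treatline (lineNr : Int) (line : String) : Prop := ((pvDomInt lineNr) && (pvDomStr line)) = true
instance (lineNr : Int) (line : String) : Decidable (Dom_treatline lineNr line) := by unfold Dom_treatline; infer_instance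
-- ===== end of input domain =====

-- B replaces A's three filter passes per word by one dispatch pass with three accumulators and
-- builds the dict over the deduplicated word list (objective: alternative decomposition, same cost).
-- Python returns -1 (not a tuple) on rejected lines; that is ported as `none`.

-- ===== PORT A =====
-- set('aeiou') etc.: sets of the single characters of the string literal.
def pvVow : PySem.Set Char := PySem.Set.ofList "aeiou".toList
def pvConsB : PySem.Set Char := PySem.Set.ofList "bcdfghjklm".toList
def pvConsN : PySem.Set Char := PySem.Set.ofList "npqrstvwxyz".toList

-- [char for char in word if char in letter_set]  (each kept char is its 1-char string)
def pvCategorize (word : String) (letterSet : PySem.Set Char) : List String :=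
  (word.toList.filter (fun c => letterSet.contains c)).map (fun c => String.singleton c)

def pvCategorizeCharacters (word : String) : List String × List String × List String :=
  (pvCategorize word pvVow, pvCategorize word pvConsB, pvCategorize word pvConsN)

def treatline (lineNr : Int) (line : String) : Option (Int × (List (String × List String × List String × List String))) :=
  if lineNr ≤ 0 then none
  else
    let line := PySem.Str.lower line
    let words := PySem.Str.split₀ (PySem.Str.strip line)
    if ¬ (words.all (fun w => PySem.Str.strIsalpha w)) then none
    else
      some (lineNr,
        (words.foldl (fun d w => d.insert w (pvCategorizeCharacters w)) PySem.Dict.empty).items)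

-- ===== PORT B =====
-- one pass: dispatch each character into one of three buckets (a 1-char string `c` satisfies
-- `c in "aeiou"` / `"b" <= c <= "m"` exactly when its character does, ported on Char)
def pvStep (acc : List String × List String × List String) (c : Char) :
    List String × List String × List String :=
  if "aeiou".toList.contains c then (acc.1 ++ [String.singleton c], acc.2.1, acc.2.2)
  else if 'b' ≤ c ∧ c ≤ 'm' then (acc.1, acc.2.1 ++ [String.singleton c], acc.2.2)
  else if 'n' ≤ c ∧ c ≤ 'z' then (acc.1, acc.2.1, acc.2.2 ++ [String.singleton c])
  else acc

def pvBuckets (word : String) : List String × List String × List String :=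
  word.toList.foldl pvStep ([], [], [])

def treatline_alt (lineNr : Int) (line : String) : Option (Int × (List (String × List String × List String × List String))) :=
  if lineNr ≤ 0 then none
  else
    let low := PySem.Str.lower line
    let words := PySem.Str.split₀ (PySem.Str.strip low)
    if ¬ (words.all (fun w => PySem.Str.strIsalpha w)) then none
    else
      some (lineNr,
        ((PySem.List.dedup words).foldl (fun d w => d.insert w (pvBuckets w)) PySem.Dict.empty).items)

-- ===== PRECONDITION & SPEC =====
-- Pre_ excludes lineNr <= 0 and lines containing a non-alphabetic word, on which A returns the
-- sentinel -1 instead of a (lineNr, dict) tuple of the declared return type.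
def Pre_treatline (lineNr : Int) (line : String) : Prop :=
  0 < lineNr ∧
  (PySem.Str.split₀ (PySem.Str.strip (PySem.Str.lower line))).all
    (fun w => PySem.Str.strIsalpha w) = true
instance (lineNr : Int) (line : String) : Decidable (Pre_treatline lineNr line) := by unfold Pre_treatline; infer_instance
def pvWitness_treatline : Int × String := (1, "Hello world")
def Spec_treatline (lineNr : Int) (line : String) (out : Option (Int × (List (String × List String × List String × List String)))) : Prop := out = treatline_alt lineNr line
instance (lineNr : Int) (line : String) (out : Option (Int × (List (String × List String × List String × List String)))) : Decidable (Spec_treatline lineNr line out) := by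
  unfold Spec_treatline
  letI : DecidableEq (Int × (List (String × List String × List String × List String))) :=
    fun a b => instDecidableEqProd a b
  infer_instance

-- ===== CLAIM (what is proved, stated in full; the proofs are below) =====
def Claim_equal_treatline : Prop := ∀ (lineNr : Int) (line : String), Dom_treatline lineNr line → Pre_treatline lineNr line → Spec_treatline lineNr line (treatline lineNr line)

-- ===== LEMMAS AND PROOFS =====

-- character classification: B's range tests coincide with A's literal consonant sets
theorem pv_consB_char (c : Char) :
    c ∈ pvConsB ↔ (c ∉ "aeiou".toList ∧ 'b' ≤ c ∧ c ≤ 'm') := by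
  show c ∈ ['b','c','d','f','g','h','j','k','l','m'] ↔ (c ∉ ['a','e','i','o','u'] ∧ 'b' ≤ c ∧ c ≤ 'm')
  simp only [List.mem_cons, List.not_mem_nil, or_false, Char.le_def, Char.ext_iff,
    UInt32.le_iff_toNat_le, UInt32.ext_iff, Char.reduceVal, UInt32.reduceToNat]
  omega

theorem pv_consN_char (c : Char) :
    c ∈ pvConsN ↔ (c ∉ "aeiou".toList ∧ 'n' ≤ c ∧ c ≤ 'z') := by
  show c ∈ ['n','p','q','r','s','t','v','w','x','y','z'] ↔ (c ∉ ['a','e','i','o','u'] ∧ 'n' ≤ c ∧ c ≤ 'z')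
  simp only [List.mem_cons, List.not_mem_nil, or_false, Char.le_def, Char.ext_iff,
    UInt32.le_iff_toNat_le, UInt32.ext_iff, Char.reduceVal, UInt32.reduceToNat]
  omega

theorem pv_vow_char (c : Char) : c ∈ pvVow ↔ c ∈ "aeiou".toList := Iff.rfl

-- B's single dispatch pass computes A's three filters at once
theorem pv_buckets_eq (cs : List Char) : ∀ v b n : List String,
    cs.foldl pvStep (v, b, n) =
      (v ++ (cs.filter (fun c => pvVow.contains c)).map (fun c => String.singleton c),
       b ++ (cs.filter (fun c => pvConsB.contains c)).map (fun c => String.singleton c),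
       n ++ (cs.filter (fun c => pvConsN.contains c)).map (fun c => String.singleton c)) := by
  induction cs with
  | nil => intro v b n; simp
  | cons c cs ih =>
    intro v b n
    have hvmem : c ∈ pvVow ↔ c ∈ "aeiou".toList := pv_vow_char c
    simp only [List.foldl_cons]
    by_cases hv : c ∈ "aeiou".toList
    · have m1 : c ∈ pvVow := hvmem.mpr hv
      have m2 : c ∉ pvConsB := fun h => ((pv_consB_char c).mp h).1 hv
      have m3 : c ∉ pvConsN := fun h => ((pv_consN_char c).mp h).1 hv
      have hc1 : "aeiou".toList.contains c = true := by simpa using hv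
      have hstep : pvStep (v, b, n) c = (v ++ [String.singleton c], b, n) := by
        unfold pvStep; rw [if_pos hc1]
      rw [hstep, ih]
      simp [PySem.Set.contains, m1, m2, m3]
    · have m1 : c ∉ pvVow := fun h => hv (hvmem.mp h)
      have hc1 : "aeiou".toList.contains c = false := by simpa using hv
      by_cases hB : 'b' ≤ c ∧ c ≤ 'm'
      · have m2 : c ∈ pvConsB := (pv_consB_char c).mpr ⟨hv, hB⟩
        have m3 : c ∉ pvConsN := by
          intro h
          have h1 := ((pv_consN_char c).mp h).2.1
          have h2 := hB.2
          simp only [Char.le_def, UInt32.le_iff_toNat_le, Char.reduceVal, UInt32.reduceToNat] at h1 h2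
          omega
        have hstep : pvStep (v, b, n) c = (v, b ++ [String.singleton c], n) := by
          unfold pvStep; rw [if_neg (by rw [hc1]; exact Bool.false_ne_true), if_pos hB]
        rw [hstep, ih]
        simp [PySem.Set.contains, m1, m2, m3]
      · by_cases hN : 'n' ≤ c ∧ c ≤ 'z'
        · have m2 : c ∉ pvConsB := fun h => hB ((pv_consB_char c).mp h).2
          have m3 : c ∈ pvConsN := (pv_consN_char c).mpr ⟨hv, hN⟩
          have hstep : pvStep (v, b, n) c = (v, b, n ++ [String.singleton c]) := by
            unfold pvStep; rw [if_neg (by rw [hc1]; exact Bool.false_ne_true), if_neg hB, if_pos hN]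
          rw [hstep, ih]
          simp [PySem.Set.contains, m1, m2, m3]
        · have m2 : c ∉ pvConsB := fun h => hB ((pv_consB_char c).mp h).2
          have m3 : c ∉ pvConsN := fun h => hN ((pv_consN_char c).mp h).2
          have hstep : pvStep (v, b, n) c = (v, b, n) := by
            unfold pvStep; rw [if_neg (by rw [hc1]; exact Bool.false_ne_true), if_neg hB, if_neg hN]
          rw [hstep, ih]
          simp [PySem.Set.contains, m1, m2, m3]

theorem pv_cat_eq_buckets (w : String) : pvCategorizeCharacters w = pvBuckets w := by
  unfold pvCategorizeCharacters pvCategorize pvBuckets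
  rw [pv_buckets_eq]
  simp

-- dict lemmas: a foldl of inserts whose value depends only on the key
theorem pv_getD_foldl_not_mem {V : Type} (f : String → V) (d0 : V) :
    ∀ (l : List String) (d : PySem.Dict String V) (w : String), w ∉ l →
      (l.foldl (fun d x => d.insert x (f x)) d).getD w d0 = d.getD w d0 := by
  intro l
  induction l with
  | nil => intro d w _; rfl
  | cons x xs ih =>
    intro d w hw
    simp only [List.mem_cons, not_or] at hw
    simp only [List.foldl_cons]
    rw [ih _ _ hw.2, PySem.Dict.getD_insert_of_ne _ _ _ hw.1]

theorem pv_getD_foldl_mem {V : Type} (f : String → V) (d0 : V) :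
    ∀ (l : List String) (d : PySem.Dict String V) (w : String), w ∈ l →
      (l.foldl (fun d x => d.insert x (f x)) d).getD w d0 = f w := by
  intro l
  induction l with
  | nil => intro d w h; exact absurd h (List.not_mem_nil)
  | cons x xs ih =>
    intro d w hw
    simp only [List.foldl_cons]
    by_cases hx : w ∈ xs
    · exact ih _ _ hx
    · have hwx : w = x := by rcases List.mem_cons.mp hw with h | h; exact h; exact absurd h hx
      subst hwx
      rw [pv_getD_foldl_not_mem f d0 xs _ _ hx, PySem.Dict.getD_insert_self]

theorem pv_items_foldl_fn {V : Type} (f : String → V) (d0 : V) (l : List String) :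
    (l.foldl (fun d x => d.insert x (f x)) PySem.Dict.empty).items
      = (PySem.Set.ofList l).map (fun w => (w, f w)) := by
  have hkeys : (l.foldl (fun d x => d.insert x (f x)) PySem.Dict.empty).keys
      = PySem.Set.ofList l := by
    have := PySem.Dict.keys_foldl_insert l (fun _ x => f x) (PySem.Dict.empty (κ := String) (ν := V))
    simpa [PySem.Set.ofList_eq_foldl, PySem.Set.update] using this
  have hnodup : (l.foldl (fun d x => d.insert x (f x)) PySem.Dict.empty).keys.Nodup := by
    rw [hkeys]; exact PySem.Set.nodup_ofList l
  rw [PySem.Dict.items_eq_map_keys _ hnodup d0, hkeys]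
  apply List.map_congr_left
  intro w hw
  rw [pv_getD_foldl_mem f d0 l PySem.Dict.empty w ((PySem.Set.mem_ofList l w).mp hw)]

theorem pv_dicts_eq (words : List String) :
    (words.foldl (fun d w => d.insert w (pvCategorizeCharacters w)) PySem.Dict.empty).items
      = ((PySem.List.dedup words).foldl (fun d w => d.insert w (pvBuckets w)) PySem.Dict.empty).items := by
  rw [pv_items_foldl_fn pvCategorizeCharacters ([], [], []) words,
      pv_items_foldl_fn pvBuckets ([], [], []) (PySem.List.dedup words)]
  rw [PySem.List.dedup_eq_ofList, PySem.Set.ofList_ofList]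
  exact List.map_congr_left (fun w _ => by rw [pv_cat_eq_buckets])

-- ===== VERDICT (by name: the statement is the Claim_ definition above) =====
theorem treatline_spec : Claim_equal_treatline := by
  intro lineNr line _ _
  unfold Spec_treatline treatline treatline_alt
  by_cases h0 : lineNr ≤ 0
  · simp only [if_pos h0]
  · simp only [if_neg h0]
    by_cases hw : ¬ ((PySem.Str.split₀ (PySem.Str.strip (PySem.Str.lower line))).all
        (fun w => PySem.Str.strIsalpha w) = true)
    · rw [if_pos hw, if_pos hw]
    · rw [if_neg hw, if_neg hw]
      exact congrArg (fun l => some (lineNr, l)) (pv_dicts_eq _)
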